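-- pv_equiv track=rewrite | github.com/muzzi85/clipmodeldeployedtoazure | room_classification_optimised_cropping.py | classify_room_from_objects_multi_label_count
-- ===== SOURCE A (Python) =====
-- def classify_room_from_objects_multi_label_count(objects_dict, min_score=3):
--     """
--     Infer room type from detected objects using object counts.
--
--     Args:
--         objects_dict (dict): {"object_label": count, ...}
--         min_score (int): minimum total score to confidently assign a room
--
--     Returns:
--         str: room type or "unknown"
--     """
--     # Normalize keys
--     detected = {k.lower().strip(): v for k, v in objects_dict.items()}
--     categories = {
--         "floorplan": ["a floorplan","a 2D house layout", "a real estate floor plan with dimensions", "a residential blueprint"],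
--         "bedroom": ["a bed", "a single bed", "a double bed", "a duvet", "a bedroom"],
--         "bathroom": ["a bath", "a bathroom basin", "a shower head", "a toilet seat or loo", "a single ended bath", "a bathroom"],
--         "living/sitting room": ["a sofa", "a dinning table and chairs","a living room"],
--         "outdoor": ["a garden", "a tree", "a car", "a building", "a sea", "a seaview"],
--         "kitchen/cooking area": ["a refrigerator", "a kitchen stove", "a stove vent hood", "a kitchen", "a kitchen sink","a kitchen","a cooking oven"],
--         "gym": ["a gym", "a training machine"],
--         "laundry": ["a washing machine"]
--     }
--
--     # Compute scores per room
--     room_scores = {room: 0 for room in categories}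
--     for room, objs in categories.items():
--         for obj in objs:
--             if obj in detected:
--                 room_scores[room] += detected[obj]  # count objects for weight
--
--     # Find the room with highest score
--     # best_room = max(room_scores, key=room_scores.get)
--     # best_score = room_scores[best_room]
--
--     if room_scores.get("floorplan", 0) >= 5:
--             return "floorplan"
--
--      # ---------------------------
--     # Rooms that pass threshold
--     # ---------------------------
--     valid_rooms = [
--         room for room, score in room_scores.items()
--         if score >= min_score and room != "floorplan"
--     ]
--     if valid_rooms:
--         if room_scores.get("bedroom", 0) == 1:
--             return "bedroom"
--     else:
--         return "unknown"
--
--     if len(valid_rooms) == 1: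
--         return valid_rooms[0]
--
--     # ---------------------------
--     # Mixed room case
--     # ---------------------------
--     return " & ".join(sorted(valid_rooms))
-- ===== SOURCE B (Python) =====
-- # Inverted-index re-implementation: one pass over the detected objects,
-- # looking each up in a prebuilt label -> [(room, multiplicity)] table,
-- # instead of probing every category entry against the detected dict.
--
-- _ROOMS = ["floorplan", "bedroom", "bathroom", "living/sitting room",
--           "outdoor", "kitchen/cooking area", "gym", "laundry"]
--
-- _INDEX = {
--     'a floorplan': [('floorplan', 1)],
--     'a 2D house layout': [('floorplan', 1)],
--     'a real estate floor plan with dimensions': [('floorplan', 1)],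
--     'a residential blueprint': [('floorplan', 1)],
--     'a bed': [('bedroom', 1)],
--     'a single bed': [('bedroom', 1)],
--     'a double bed': [('bedroom', 1)],
--     'a duvet': [('bedroom', 1)],
--     'a bedroom': [('bedroom', 1)],
--     'a bath': [('bathroom', 1)],
--     'a bathroom basin': [('bathroom', 1)],
--     'a shower head': [('bathroom', 1)],
--     'a toilet seat or loo': [('bathroom', 1)],
--     'a single ended bath': [('bathroom', 1)],
--     'a bathroom': [('bathroom', 1)],
--     'a sofa': [('living/sitting room', 1)],
--     'a dinning table and chairs': [('living/sitting room', 1)],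
--     'a living room': [('living/sitting room', 1)],
--     'a garden': [('outdoor', 1)],
--     'a tree': [('outdoor', 1)],
--     'a car': [('outdoor', 1)],
--     'a building': [('outdoor', 1)],
--     'a sea': [('outdoor', 1)],
--     'a seaview': [('outdoor', 1)],
--     'a refrigerator': [('kitchen/cooking area', 1)],
--     'a kitchen stove': [('kitchen/cooking area', 1)],
--     'a stove vent hood': [('kitchen/cooking area', 1)],
--     'a kitchen': [('kitchen/cooking area', 2)],
--     'a kitchen sink': [('kitchen/cooking area', 1)],
--     'a cooking oven': [('kitchen/cooking area', 1)],
--     'a gym': [('gym', 1)],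
--     'a training machine': [('gym', 1)],
--     'a washing machine': [('laundry', 1)],
-- }
--
--
-- def classify_room_from_objects_multi_label_count(objects_dict, min_score=3):
--     detected = {k.lower().strip(): v for k, v in objects_dict.items()}
--
--     room_scores = {room: 0 for room in _ROOMS}
--     for obj, cnt in detected.items():
--         for room, mult in _INDEX.get(obj, []):
--             room_scores[room] += cnt * mult
--
--     if room_scores.get("floorplan", 0) >= 5:
--         return "floorplan"
--
--     valid_rooms = [room for room, score in room_scores.items()
--                    if score >= min_score and room != "floorplan"]
--     if not valid_rooms:
--         return "unknown"
--     if room_scores.get("bedroom", 0) == 1: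
--         return "bedroom"
--     if len(valid_rooms) == 1:
--         return valid_rooms[0]
--     return " & ".join(sorted(valid_rooms))
-- ===== Notes on version B (the rewrite author's own statement) =====
-- stated objective: alternative
-- what changed: Scoring is reversed: instead of probing each of the 22 hard-coded category entries against the detected dict, B prebuilds an inverted label->[(room,multiplicity)] index (the duplicated 'a kitchen' entry carried as multiplicity 2) and makes a single input-driven pass over the detected items, adding count*multiplicity to the indexed rooms; the decision cascade is an equivalent early-return chain.
import Mathlib
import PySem

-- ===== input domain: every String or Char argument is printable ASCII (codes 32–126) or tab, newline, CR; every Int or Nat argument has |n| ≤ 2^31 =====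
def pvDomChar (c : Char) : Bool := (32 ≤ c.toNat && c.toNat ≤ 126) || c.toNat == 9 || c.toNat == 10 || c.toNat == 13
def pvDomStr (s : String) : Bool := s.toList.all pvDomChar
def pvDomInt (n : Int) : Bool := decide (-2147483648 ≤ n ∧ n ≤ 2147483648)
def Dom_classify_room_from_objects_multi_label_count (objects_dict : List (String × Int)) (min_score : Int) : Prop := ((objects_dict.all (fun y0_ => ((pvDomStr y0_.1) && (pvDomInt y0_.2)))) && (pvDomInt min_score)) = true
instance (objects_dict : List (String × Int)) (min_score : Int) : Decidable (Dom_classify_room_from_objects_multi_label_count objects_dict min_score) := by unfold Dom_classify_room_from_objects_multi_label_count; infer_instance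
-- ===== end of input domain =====

-- B replaces A's category-by-category membership probing with a prebuilt inverted
-- label->[(room, multiplicity)] index and a single pass over the detected items
-- (objective: alternative decomposition, same cost).


-- ===== PORT A =====

-- the literal `categories` table of A
def catsA : List (String × List String) :=
  [("floorplan", ["a floorplan", "a 2D house layout", "a real estate floor plan with dimensions", "a residential blueprint"]),
   ("bedroom", ["a bed", "a single bed", "a double bed", "a duvet", "a bedroom"]),
   ("bathroom", ["a bath", "a bathroom basin", "a shower head", "a toilet seat or loo", "a single ended bath", "a bathroom"]),
   ("living/sitting room", ["a sofa", "a dinning table and chairs", "a living room"]),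
   ("outdoor", ["a garden", "a tree", "a car", "a building", "a sea", "a seaview"]),
   ("kitchen/cooking area", ["a refrigerator", "a kitchen stove", "a stove vent hood", "a kitchen", "a kitchen sink", "a kitchen", "a cooking oven"]),
   ("gym", ["a gym", "a training machine"]),
   ("laundry", ["a washing machine"])]

-- detected = {k.lower().strip(): v for k, v in objects_dict.items()}
def detectedA (objects_dict : List (String × Int)) : PySem.Dict String Int :=
  objects_dict.foldl (fun d p => d.insert (PySem.Str.strip (PySem.Str.lower p.1)) p.2) PySem.Dict.empty

-- room_scores = {room: 0 …}; then category-by-category probing of `detected`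
def scoresA (detected : PySem.Dict String Int) : PySem.Dict String Int :=
  catsA.foldl
    (fun rs c =>
      c.2.foldl
        (fun rs obj =>
          if detected.contains obj then rs.modify c.1 0 (fun x => x + detected.getD obj 0) else rs)
        rs)
    (catsA.foldl (fun d c => d.insert c.1 0) PySem.Dict.empty)

def classify_room_from_objects_multi_label_count (objects_dict : List (String × Int)) (min_score : Int) : String :=
  let room_scores := scoresA (detectedA objects_dict)
  if 5 ≤ room_scores.getD "floorplan" 0 then "floorplan"
  else
    let valid_rooms :=
      (room_scores.items.filter (fun p => decide (min_score ≤ p.2) && (p.1 != "floorplan"))).map Prod.fst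
    if valid_rooms.isEmpty then "unknown"
    else if room_scores.getD "bedroom" 0 = 1 then "bedroom"
    else if valid_rooms.length = 1 then valid_rooms.headD ""   -- valid_rooms[0]; list is nonempty in this branch
    else PySem.Str.join " & " (PySem.List.sorted valid_rooms id false)

-- ===== PORT B =====

-- _ROOMS
def roomsB : List String :=
  ["floorplan", "bedroom", "bathroom", "living/sitting room", "outdoor", "kitchen/cooking area", "gym", "laundry"]

-- _INDEX : the prebuilt inverted index label -> [(room, multiplicity)]
def idxB : PySem.Dict String (List (String × Int)) := PySem.Dict.mk
  [("a floorplan", [("floorplan", 1)]),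
   ("a 2D house layout", [("floorplan", 1)]),
   ("a real estate floor plan with dimensions", [("floorplan", 1)]),
   ("a residential blueprint", [("floorplan", 1)]),
   ("a bed", [("bedroom", 1)]),
   ("a single bed", [("bedroom", 1)]),
   ("a double bed", [("bedroom", 1)]),
   ("a duvet", [("bedroom", 1)]),
   ("a bedroom", [("bedroom", 1)]),
   ("a bath", [("bathroom", 1)]),
   ("a bathroom basin", [("bathroom", 1)]),
   ("a shower head", [("bathroom", 1)]),
   ("a toilet seat or loo", [("bathroom", 1)]),
   ("a single ended bath", [("bathroom", 1)]),
   ("a bathroom", [("bathroom", 1)]),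
   ("a sofa", [("living/sitting room", 1)]),
   ("a dinning table and chairs", [("living/sitting room", 1)]),
   ("a living room", [("living/sitting room", 1)]),
   ("a garden", [("outdoor", 1)]),
   ("a tree", [("outdoor", 1)]),
   ("a car", [("outdoor", 1)]),
   ("a building", [("outdoor", 1)]),
   ("a sea", [("outdoor", 1)]),
   ("a seaview", [("outdoor", 1)]),
   ("a refrigerator", [("kitchen/cooking area", 1)]),
   ("a kitchen stove", [("kitchen/cooking area", 1)]),
   ("a stove vent hood", [("kitchen/cooking area", 1)]),
   ("a kitchen", [("kitchen/cooking area", 2)]),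
   ("a kitchen sink", [("kitchen/cooking area", 1)]),
   ("a cooking oven", [("kitchen/cooking area", 1)]),
   ("a gym", [("gym", 1)]),
   ("a training machine", [("gym", 1)]),
   ("a washing machine", [("laundry", 1)])]

-- detected = {k.lower().strip(): v for k, v in objects_dict.items()}
def detectedB (objects_dict : List (String × Int)) : PySem.Dict String Int :=
  objects_dict.foldl (fun d p => d.insert (PySem.Str.strip (PySem.Str.lower p.1)) p.2) PySem.Dict.empty

-- room_scores = {room: 0 …}; then a single pass over detected.items() through _INDEX
def scoresB (detected : PySem.Dict String Int) : PySem.Dict String Int :=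
  detected.items.foldl
    (fun rs p =>
      (idxB.getD p.1 []).foldl (fun rs q => rs.modify q.1 0 (fun x => x + p.2 * q.2)) rs)
    (roomsB.foldl (fun d r => d.insert r 0) PySem.Dict.empty)

def classify_room_from_objects_multi_label_count_alt (objects_dict : List (String × Int)) (min_score : Int) : String :=
  let room_scores := scoresB (detectedB objects_dict)
  if 5 ≤ room_scores.getD "floorplan" 0 then "floorplan"
  else
    let valid_rooms :=
      (room_scores.items.filter (fun p => decide (min_score ≤ p.2) && (p.1 != "floorplan"))).map Prod.fst
    if valid_rooms.isEmpty then "unknown"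
    else if room_scores.getD "bedroom" 0 = 1 then "bedroom"
    else if valid_rooms.length = 1 then valid_rooms.headD ""   -- valid_rooms[0]; list is nonempty in this branch
    else PySem.Str.join " & " (PySem.List.sorted valid_rooms id false)

-- ===== PRECONDITION & SPEC =====
def Spec_classify_room_from_objects_multi_label_count (objects_dict : List (String × Int)) (min_score : Int) (out : String) : Prop := out = classify_room_from_objects_multi_label_count_alt objects_dict min_score
instance (objects_dict : List (String × Int)) (min_score : Int) (out : String) : Decidable (Spec_classify_room_from_objects_multi_label_count objects_dict min_score out) := by unfold Spec_classify_room_from_objects_multi_label_count; infer_instance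

-- ===== CLAIM (what is proved, stated in full; the proofs are below) =====
def Claim_equal_classify_room_from_objects_multi_label_count : Prop := ∀ (objects_dict : List (String × Int)) (min_score : Int), Dom_classify_room_from_objects_multi_label_count objects_dict min_score → Spec_classify_room_from_objects_multi_label_count objects_dict min_score (classify_room_from_objects_multi_label_count objects_dict min_score)


-- ===== LEMMAS AND PROOFS =====

-- Σ_{o ∈ objs} detected.getD o 0   (total weight A's inner loop adds for one category)
def gsum (objs : List String) (d : PySem.Dict String Int) : Int :=
  (objs.map (fun o => d.getD o 0)).sum

-- Σ_{q ∈ qs, q.1 = r} q.2   (multiplicity an index entry carries for room r)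
def mOf (r : String) (qs : List (String × Int)) : Int :=
  (qs.map (fun q => if q.1 = r then q.2 else 0)).sum

-- the keys of the inverted index
def idxKeys : List String :=
  ["a floorplan", "a 2D house layout", "a real estate floor plan with dimensions", "a residential blueprint",
   "a bed", "a single bed", "a double bed", "a duvet", "a bedroom",
   "a bath", "a bathroom basin", "a shower head", "a toilet seat or loo", "a single ended bath", "a bathroom",
   "a sofa", "a dinning table and chairs", "a living room",
   "a garden", "a tree", "a car", "a building", "a sea", "a seaview",
   "a refrigerator", "a kitchen stove", "a stove vent hood", "a kitchen", "a kitchen sink", "a cooking oven",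
   "a gym", "a training machine", "a washing machine"]

-- ---- A's inner loop, pointwise ----
lemma getD_innerA (D : PySem.Dict String Int) (objs : List String) (room : String) :
    ∀ (rs : PySem.Dict String Int) (r : String),
      (objs.foldl (fun rs obj => if D.contains obj then rs.modify room 0 (fun x => x + D.getD obj 0) else rs) rs).getD r 0
        = rs.getD r 0 + (if r = room then gsum objs D else 0) := by
  induction objs with
  | nil => intro rs r; simp [gsum]
  | cons o t ih =>
    intro rs r
    simp only [List.foldl_cons, gsum, List.map_cons, List.sum_cons] at *
    rw [ih]
    by_cases hc : D.contains o
    · simp only [hc, if_pos, PySem.Dict.getD_modify]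
      by_cases hr : r = room
      · simp [hr]; ring
      · simp [hr]
    · rw [if_neg (by simp [hc]), PySem.Dict.getD_of_not_contains D 0 (by simp_all)]
      by_cases hr : r = room <;> simp [hr]

lemma keys_innerA (D : PySem.Dict String Int) (objs : List String) (room : String) :
    ∀ (rs : PySem.Dict String Int), rs.contains room = true →
      (objs.foldl (fun rs obj => if D.contains obj then rs.modify room 0 (fun x => x + D.getD obj 0) else rs) rs).keys
        = rs.keys := by
  induction objs with
  | nil => intro rs _; rfl
  | cons o t ih =>
    intro rs h
    simp only [List.foldl_cons]
    by_cases hc : D.contains o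
    · rw [if_pos hc, ih _ (by simp [PySem.Dict.contains_modify, h]),
        PySem.Dict.keys_modify, PySem.Dict.keys_insert_of_contains rs _ h]
    · rw [if_neg (by simp [hc]), ih _ h]

-- ---- A's outer loop, pointwise ----
lemma getD_outerA (D : PySem.Dict String Int) :
    ∀ (cats : List (String × List String)) (rs : PySem.Dict String Int) (r : String),
      (cats.foldl (fun rs c => c.2.foldl
          (fun rs obj => if D.contains obj then rs.modify c.1 0 (fun x => x + D.getD obj 0) else rs) rs) rs).getD r 0
        = rs.getD r 0 + (cats.map (fun c => if r = c.1 then gsum c.2 D else 0)).sum := by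
  intro cats
  induction cats with
  | nil => intro rs r; simp
  | cons c t ih =>
    intro rs r
    simp only [List.foldl_cons, List.map_cons, List.sum_cons]
    rw [ih, getD_innerA]
    ring

lemma keys_outerA (D : PySem.Dict String Int) :
    ∀ (cats : List (String × List String)) (rs : PySem.Dict String Int),
      (∀ c ∈ cats, rs.contains c.1 = true) →
      (cats.foldl (fun rs c => c.2.foldl
          (fun rs obj => if D.contains obj then rs.modify c.1 0 (fun x => x + D.getD obj 0) else rs) rs) rs).keys
        = rs.keys := by
  intro cats
  induction cats with
  | nil => intro rs _; rfl
  | cons c t ih =>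
    intro rs h
    simp only [List.foldl_cons]
    have hk := keys_innerA D c.2 c.1 rs (h c (List.mem_cons_self ..))
    rw [ih, hk]
    intro a ha
    rw [PySem.Dict.contains_iff_mem_keys, hk, ← PySem.Dict.contains_iff_mem_keys]
    exact h a (List.mem_cons_of_mem _ ha)

-- ---- B's inner loop, pointwise ----
lemma getD_innerB (v : Int) (qs : List (String × Int)) :
    ∀ (rs : PySem.Dict String Int) (r : String),
      (qs.foldl (fun rs q => rs.modify q.1 0 (fun x => x + v * q.2)) rs).getD r 0
        = rs.getD r 0 + v * mOf r qs := by
  induction qs with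
  | nil => intro rs r; simp [mOf]
  | cons q t ih =>
    intro rs r
    simp only [List.foldl_cons, mOf, List.map_cons, List.sum_cons] at *
    rw [ih]
    simp only [PySem.Dict.getD_modify]
    by_cases hr : r = q.1
    · simp [hr]; try ring
    · simp [hr, Ne.symm hr]; try ring

lemma keys_innerB (v : Int) (qs : List (String × Int)) :
    ∀ (rs : PySem.Dict String Int), (∀ q ∈ qs, rs.contains q.1 = true) →
      (qs.foldl (fun rs q => rs.modify q.1 0 (fun x => x + v * q.2)) rs).keys
        = rs.keys := by
  induction qs with
  | nil => intro rs _; rfl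
  | cons q t ih =>
    intro rs h
    simp only [List.foldl_cons]
    have hq : rs.contains q.1 = true := h q (List.mem_cons_self ..)
    rw [ih _ (by intro a ha; simp [PySem.Dict.contains_modify, h a (List.mem_cons_of_mem _ ha)]),
      PySem.Dict.keys_modify, PySem.Dict.keys_insert_of_contains rs _ hq]

-- every room named by any index entry is one of roomsB
lemma idx_rooms_sub (k : String) : ∀ q ∈ idxB.getD k [], q.1 ∈ roomsB := by
  intro q hq
  rw [PySem.Dict.getD_eq_get?_getD] at hq
  cases hg : idxB.get? k with
  | none => rw [hg] at hq; simp at hq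
  | some v =>
    rw [hg] at hq
    have hm := PySem.Dict.mem_items_of_get?_eq_some _ hg
    rw [show idxB.items = idxB.items from rfl] at hm
    fin_cases hm <;> simp_all <;> subst hq <;> decide

-- ---- B's outer loop, pointwise ----
lemma getD_outerB :
    ∀ (L : List (String × Int)) (rs : PySem.Dict String Int) (r : String),
      (L.foldl (fun rs p => (idxB.getD p.1 []).foldl (fun rs q => rs.modify q.1 0 (fun x => x + p.2 * q.2)) rs) rs).getD r 0
        = rs.getD r 0 + (L.map (fun p => p.2 * mOf r (idxB.getD p.1 []))).sum := by
  intro L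
  induction L with
  | nil => intro rs r; simp
  | cons p t ih =>
    intro rs r
    simp only [List.foldl_cons, List.map_cons, List.sum_cons]
    rw [ih, getD_innerB]
    ring

lemma keys_outerB :
    ∀ (L : List (String × Int)) (rs : PySem.Dict String Int), rs.keys = roomsB →
      (L.foldl (fun rs p => (idxB.getD p.1 []).foldl (fun rs q => rs.modify q.1 0 (fun x => x + p.2 * q.2)) rs) rs).keys
        = roomsB := by
  intro L
  induction L with
  | nil => intro rs h; exact h
  | cons p t ih =>
    intro rs h
    simp only [List.foldl_cons]
    apply ih
    rw [keys_innerB, h]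
    intro q hq
    rw [PySem.Dict.contains_iff_mem_keys, h]
    exact idx_rooms_sub p.1 q hq

lemma getD_notin (k : String) (hk : k ∉ idxKeys) : idxB.getD k [] = ([] : List (String × Int)) := by
  rw [PySem.Dict.getD_eq_get?_getD]
  rw [(PySem.Dict.get?_eq_none_iff_not_mem_keys idxB k).mpr (by simpa [idxB, PySem.Dict.keys_mk, idxKeys] using hk)]
  rfl

-- multiplicities stored in the index = occurrence counts in A's category lists (for each room)
lemma mult_count (k : String) :
    mOf "floorplan" (idxB.getD k []) = (["a floorplan", "a 2D house layout", "a real estate floor plan with dimensions", "a residential blueprint"].count k : Int)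
  ∧ mOf "bedroom" (idxB.getD k []) = (["a bed", "a single bed", "a double bed", "a duvet", "a bedroom"].count k : Int)
  ∧ mOf "bathroom" (idxB.getD k []) = (["a bath", "a bathroom basin", "a shower head", "a toilet seat or loo", "a single ended bath", "a bathroom"].count k : Int)
  ∧ mOf "living/sitting room" (idxB.getD k []) = (["a sofa", "a dinning table and chairs", "a living room"].count k : Int)
  ∧ mOf "outdoor" (idxB.getD k []) = (["a garden", "a tree", "a car", "a building", "a sea", "a seaview"].count k : Int)
  ∧ mOf "kitchen/cooking area" (idxB.getD k []) = (["a refrigerator", "a kitchen stove", "a stove vent hood", "a kitchen", "a kitchen sink", "a kitchen", "a cooking oven"].count k : Int)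
  ∧ mOf "gym" (idxB.getD k []) = (["a gym", "a training machine"].count k : Int)
  ∧ mOf "laundry" (idxB.getD k []) = (["a washing machine"].count k : Int) := by
  by_cases hk : k ∈ idxKeys
  · simp only [idxKeys, List.mem_cons, List.not_mem_nil, or_false] at hk
    rcases hk with rfl|rfl|rfl|rfl|rfl|rfl|rfl|rfl|rfl|rfl|rfl|rfl|rfl|rfl|rfl|rfl|rfl|rfl|rfl|rfl|rfl|rfl|rfl|rfl|rfl|rfl|rfl|rfl|rfl|rfl|rfl|rfl|rfl <;> decide
  · rw [getD_notin k hk]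
    have hc : ∀ l : List String, (∀ x ∈ l, x ∈ idxKeys) → l.count k = 0 := by
      intro l hl
      exact List.count_eq_zero.mpr (fun hm => hk (hl k hm))
    refine ⟨?_, ?_, ?_, ?_, ?_, ?_, ?_, ?_⟩ <;>
      rw [hc _ (by decide)] <;> simp [mOf]

-- gsum over a dict with one more (fresh-keyed) entry
lemma gsum_cons (objs : List String) (k : String) (v : Int) (L : List (String × Int))
    (hk : k ∉ L.map Prod.fst) :
    gsum objs (PySem.Dict.mk ((k, v) :: L)) = gsum objs (PySem.Dict.mk L) + v * (objs.count k : Int) := by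
  induction objs with
  | nil => simp [gsum]
  | cons o t ih =>
    simp only [gsum, List.map_cons, List.sum_cons, List.count_cons] at *
    rw [PySem.Dict.getD_eq_get?_getD, PySem.Dict.get?_mk_cons]
    by_cases ho : k = o
    · subst ho
      have h0 : (PySem.Dict.mk L).getD k 0 = 0 := by
        rw [PySem.Dict.getD_eq_get?_getD,
          (PySem.Dict.get?_eq_none_iff_not_mem_keys _ k).mpr (by simpa [PySem.Dict.keys_mk] using hk)]
        rfl
      simp only [beq_self_eq_true, if_pos, ih, h0]
      simp only [Option.getD_some]
      push_cast
      ring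
    · rw [if_neg (by simp [ho]), ih, if_neg (by simp [Ne.symm ho]), ← PySem.Dict.getD_eq_get?_getD]
      push_cast
      ring

-- the core exchange: B's items-driven sum = A's category-list sum
lemma core (r : String) (objs : List String)
    (hm : ∀ k, mOf r (idxB.getD k []) = (objs.count k : Int)) :
    ∀ L : List (String × Int), (L.map Prod.fst).Nodup →
      ((L.map (fun p => p.2 * mOf r (idxB.getD p.1 []))).sum) = gsum objs (PySem.Dict.mk L) := by
  intro L
  induction L with
  | nil =>
    intro _
    have h0 : ∀ o : String, (PySem.Dict.mk ([] : List (String × Int))).getD o 0 = 0 := fun o => rfl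
    simp [gsum, h0]
  | cons p t ih =>
    intro hnd
    rw [List.map_cons, List.nodup_cons] at hnd
    obtain ⟨h1, h2⟩ := hnd
    simp only [List.map_cons, List.sum_cons]
    have hp : (p.1, p.2) = p := rfl
    rw [← hp, gsum_cons _ _ _ _ h1, ← ih h2, hm]
    ring

lemma scores_eq (D : PySem.Dict String Int) (hnd : D.keys.Nodup) : scoresA D = scoresB D := by
  have hitems : (D.items.map Prod.fst).Nodup := hnd
  have hmkD : PySem.Dict.mk D.items = D := rfl
  have hA : (scoresA D).keys = roomsB := by
    unfold scoresA
    rw [keys_outerA D catsA _ (by decide)]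
    decide
  have hB : (scoresB D).keys = roomsB := by
    unfold scoresB
    exact keys_outerB D.items _ (by decide)
  apply PySem.Dict.ext
  rw [PySem.Dict.items_eq_map_keys _ (by rw [hA]; decide) 0,
    PySem.Dict.items_eq_map_keys _ (by rw [hB]; decide) 0, hA, hB]
  have eA := getD_outerA D catsA (catsA.foldl (fun d c => d.insert c.1 0) PySem.Dict.empty)
  have eB := getD_outerB D.items (roomsB.foldl (fun d r => d.insert r 0) PySem.Dict.empty)
  simp only [roomsB, List.map_cons, List.map_nil]
  refine congrArg₂ _ ?_ (congrArg₂ _ ?_ (congrArg₂ _ ?_ (congrArg₂ _ ?_ (congrArg₂ _ ?_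
    (congrArg₂ _ ?_ (congrArg₂ _ ?_ (congrArg₂ _ ?_ rfl))))))) <;>
  · refine congrArg _ ?_
    show (scoresA D).getD _ 0 = (scoresB D).getD _ 0
    unfold scoresA scoresB
    rw [eA, eB]
    first
    | rw [core _ _ (fun k => (mult_count k).1) D.items hitems]
    | rw [core _ _ (fun k => (mult_count k).2.1) D.items hitems]
    | rw [core _ _ (fun k => (mult_count k).2.2.1) D.items hitems]
    | rw [core _ _ (fun k => (mult_count k).2.2.2.1) D.items hitems]
    | rw [core _ _ (fun k => (mult_count k).2.2.2.2.1) D.items hitems]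
    | rw [core _ _ (fun k => (mult_count k).2.2.2.2.2.1) D.items hitems]
    | rw [core _ _ (fun k => (mult_count k).2.2.2.2.2.2.1) D.items hitems]
    | rw [core _ _ (fun k => (mult_count k).2.2.2.2.2.2.2) D.items hitems]
    simp [catsA, roomsB, hmkD, PySem.Dict.getD_insert]

lemma detected_nodup (objects_dict : List (String × Int)) : (detectedA objects_dict).keys.Nodup := by
  unfold detectedA
  exact PySem.Dict.nodup_keys_foldl_insert_key objects_dict
    (fun p => PySem.Str.strip (PySem.Str.lower p.1)) (fun _ p => p.2) PySem.Dict.empty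
    PySem.Dict.nodup_keys_empty

-- ===== VERDICT (by name: the statement is the Claim_ definition above) =====
theorem classify_room_from_objects_multi_label_count_spec : Claim_equal_classify_room_from_objects_multi_label_count := by
  intro objects_dict min_score _
  unfold Spec_classify_room_from_objects_multi_label_count
  unfold classify_room_from_objects_multi_label_count classify_room_from_objects_multi_label_count_alt
  have hd : detectedB objects_dict = detectedA objects_dict := rfl
  rw [hd, scores_eq (detectedA objects_dict) (detected_nodup objects_dict)]
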